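-- pv_equiv track=rewrite | github.com/muneebaifrah/Unstop-100-Days-Coding-Sprint | Day-53/4.Candy_Shop.py | user_logic
-- ===== SOURCE A (Python) =====
-- MOD = 10**9 + 7
--
-- def user_logic(n, heights):
--     # Build pattern between consecutive labels i and i+1 in terms of positions pos[i]
--     # '<' means pos[i] < pos[i+1]
--     # '>' means pos[i] > pos[i+1]
--     # '?' means no constraint (equal heights)
--     pat = []
--     for i in range(n - 1):
--         if heights[i] > heights[i + 1]:
--             pat.append('<')
--         elif heights[i] < heights[i + 1]:
--             pat.append('>')
--         else:
--             pat.append('?')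
--
--     # DP:
--     # dp[j] = number of valid ways for labels 1..i (current i),
--     #         where pos[i] is the (j+1)-th smallest among the used positions.
--     dp = [1]  # i = 1
--
--     for i in range(2, n + 1):
--         sign = pat[i - 2]  # relation between (i-1) and i in pos[]
--         total = sum(dp) % MOD
--
--         if sign == '?':
--             # no constraint between pos[i-1] and pos[i]
--             dp = [total] * i
--             continue
--
--         # prefix sums of dp (length i-1)
--         pref = [0] * (i - 1)
--         run = 0
--         for idx, val in enumerate(dp):
--             run += val
--             if run >= MOD:
--                 run -= MOD
--             pref[idx] = run
--
--         new = [0] * i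
--         if sign == '<':
--             # pos[i-1] < pos[i]  => previous rank t < new rank j
--             # new[j] = sum_{t=0..j-1} dp[t]
--             for j in range(1, i):
--                 new[j] = pref[j - 1]
--             # new[0] stays 0
--         else:
--             # sign == '>'
--             # pos[i-1] > pos[i] => previous rank t >= new rank j
--             # new[j] = sum_{t=j..i-2} dp[t] = total - sum_{t=0..j-1}
--             for j in range(i):
--                 if j == 0:
--                     new[j] = pref[-1]
--                 else:
--                     new[j] = (pref[-1] - pref[j - 1]) % MOD
--
--         dp = new
--
--     return sum(dp) % MOD
-- ===== SOURCE B (Python) =====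
-- MOD = 10**9 + 7
--
-- def user_logic(n, heights):
--     # Same DP on ranks, but no pattern list and no prefix-sum table:
--     # each new dp entry is computed as a direct slice sum (O(n^3) overall).
--     dp = [1]
--     for i in range(2, n + 1):
--         a, b = heights[i - 2], heights[i - 1]
--         if a == b:
--             t = sum(dp) % MOD
--             dp = [t] * i
--         elif a > b:  # pattern '<': pos[i-1] < pos[i]
--             dp = [sum(dp[:j]) % MOD for j in range(i)]
--         else:        # pattern '>': pos[i-1] > pos[i]
--             dp = [sum(dp[j:]) % MOD for j in range(i)]
--     return sum(dp) % MOD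
-- ===== Notes on version B (the rewrite author's own statement) =====
-- stated objective: simpler
-- what changed: B drops the '<'/'>'/'?' pattern list and the prefix-sum table: it compares the two heights directly each iteration and computes every new dp entry as a direct slice sum (sum(dp[:j]) / sum(dp[j:])), turning A's single-pass prefix table into repeated scanning.
import Mathlib
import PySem

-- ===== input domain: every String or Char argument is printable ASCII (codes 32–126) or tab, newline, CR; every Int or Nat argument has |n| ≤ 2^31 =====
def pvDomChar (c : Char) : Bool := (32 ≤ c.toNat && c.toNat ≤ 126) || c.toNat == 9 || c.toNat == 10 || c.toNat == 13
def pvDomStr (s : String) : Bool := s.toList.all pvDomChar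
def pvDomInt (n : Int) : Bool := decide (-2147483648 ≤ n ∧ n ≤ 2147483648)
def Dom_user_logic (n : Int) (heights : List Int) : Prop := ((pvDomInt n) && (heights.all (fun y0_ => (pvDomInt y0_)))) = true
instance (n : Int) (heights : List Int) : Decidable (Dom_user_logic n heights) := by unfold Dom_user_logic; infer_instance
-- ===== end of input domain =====

-- B drops A's pattern list and prefix-sum table: it reads the two heights directly each
-- step and computes every new dp entry as a direct slice sum (simpler code, O(n^3) vs A's O(n^2)).

def pvMOD : Int := 1000000007

-- ===== PORT A =====
def user_logic (n : Int) (heights : List Int) : Int :=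
  let pat : List Char := (PySem.List.pyRange 0 (n - 1) 1).foldl (fun pat i =>
    pat ++ [if PySem.List.pyGetD heights i 0 > PySem.List.pyGetD heights (i + 1) 0 then '<'
            else if PySem.List.pyGetD heights i 0 < PySem.List.pyGetD heights (i + 1) 0 then '>'
            else '?']) []
  let dp : List Int := [1]
  let dp := (PySem.List.pyRange 2 (n + 1) 1).foldl (fun dp i =>
    let sign := PySem.List.pyGetD pat (i - 2) '?'
    let total := PySem.Int.mod dp.sum pvMOD
    if sign = '?' then
      List.replicate i.toNat total
    else
      let pref := (dp.foldl (fun (st : List Int × Int) val =>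
          let run := st.2 + val
          let run := if run ≥ pvMOD then run - pvMOD else run
          (st.1 ++ [run], run)) ([], 0)).1
      if sign = '<' then
        -- new = [0]*i; for j in range(1, i): new[j] = pref[j-1]
        (PySem.List.pyRange 1 i 1).foldl (fun nw j => nw ++ [PySem.List.pyGetD pref (j - 1) 0]) [0]
      else
        -- for j in range(i): new[j] = pref[-1] if j == 0 else (pref[-1] - pref[j-1]) % MOD
        (PySem.List.pyRange 0 i 1).foldl (fun nw j =>
          nw ++ [if j = 0 then PySem.List.pyGetD pref (-1) 0
                 else PySem.Int.mod (PySem.List.pyGetD pref (-1) 0 - PySem.List.pyGetD pref (j - 1) 0) pvMOD]) []) dp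
  PySem.Int.mod dp.sum pvMOD

-- ===== PORT B =====
def user_logic_alt (n : Int) (heights : List Int) : Int :=
  let dp : List Int := [1]
  let dp := (PySem.List.pyRange 2 (n + 1) 1).foldl (fun dp i =>
    let a := PySem.List.pyGetD heights (i - 2) 0
    let b := PySem.List.pyGetD heights (i - 1) 0
    if a = b then
      let t := PySem.Int.mod dp.sum pvMOD
      List.replicate i.toNat t
    else if a > b then
      (PySem.List.pyRange 0 i 1).map (fun j => PySem.Int.mod (PySem.List.slice dp none (some j)).sum pvMOD)
    else
      (PySem.List.pyRange 0 i 1).map (fun j => PySem.Int.mod (PySem.List.slice dp (some j) none).sum pvMOD)) dp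
  PySem.Int.mod dp.sum pvMOD

-- ===== PRECONDITION & SPEC =====
-- Pre_ excludes exactly the inputs where Python A raises IndexError (heights too short
-- for n, with n ≥ 2 needing indices up to n-1); B raises there too.
def Pre_user_logic (n : Int) (heights : List Int) : Prop :=
  n ≤ heights.length ∨ n ≤ 1
instance (n : Int) (heights : List Int) : Decidable (Pre_user_logic n heights) := by
  unfold Pre_user_logic; infer_instance
def pvWitness_user_logic : Int × List Int := (4, [1, 3, 3, 2])

def Spec_user_logic (n : Int) (heights : List Int) (out : Int) : Prop := out = user_logic_alt n heights
instance (n : Int) (heights : List Int) (out : Int) : Decidable (Spec_user_logic n heights out) := by unfold Spec_user_logic; infer_instance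

-- ===== CLAIM (what is proved, stated in full; the proofs are below) =====
def Claim_equal_user_logic : Prop := ∀ (n : Int) (heights : List Int), Dom_user_logic n heights → Pre_user_logic n heights → Spec_user_logic n heights (user_logic n heights)

-- ===== LEMMAS AND PROOFS =====

-- proof-side mirrors of the two loop bodies
def patA (n : Int) (heights : List Int) : List Char :=
  (PySem.List.pyRange 0 (n - 1) 1).foldl (fun pat i =>
    pat ++ [if PySem.List.pyGetD heights i 0 > PySem.List.pyGetD heights (i + 1) 0 then '<'
            else if PySem.List.pyGetD heights i 0 < PySem.List.pyGetD heights (i + 1) 0 then '>'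
            else '?']) []

def prefStep : List Int × Int → Int → List Int × Int := fun st val =>
  let run := st.2 + val
  let run := if run ≥ pvMOD then run - pvMOD else run
  (st.1 ++ [run], run)

def stepA (pat : List Char) (dp : List Int) (i : Int) : List Int :=
  let sign := PySem.List.pyGetD pat (i - 2) '?'
  let total := PySem.Int.mod dp.sum pvMOD
  if sign = '?' then
    List.replicate i.toNat total
  else
    let pref := (dp.foldl prefStep ([], 0)).1
    if sign = '<' then
      (PySem.List.pyRange 1 i 1).foldl (fun nw j => nw ++ [PySem.List.pyGetD pref (j - 1) 0]) [0]
    else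
      (PySem.List.pyRange 0 i 1).foldl (fun nw j =>
        nw ++ [if j = 0 then PySem.List.pyGetD pref (-1) 0
               else PySem.Int.mod (PySem.List.pyGetD pref (-1) 0 - PySem.List.pyGetD pref (j - 1) 0) pvMOD]) []

def stepB (heights : List Int) (dp : List Int) (i : Int) : List Int :=
  let a := PySem.List.pyGetD heights (i - 2) 0
  let b := PySem.List.pyGetD heights (i - 1) 0
  if a = b then
    List.replicate i.toNat (PySem.Int.mod dp.sum pvMOD)
  else if a > b then
    (PySem.List.pyRange 0 i 1).map (fun j => PySem.Int.mod (PySem.List.slice dp none (some j)).sum pvMOD)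
  else
    (PySem.List.pyRange 0 i 1).map (fun j => PySem.Int.mod (PySem.List.slice dp (some j) none).sum pvMOD)

lemma user_logic_eq (n : Int) (heights : List Int) :
    user_logic n heights =
      PySem.Int.mod ((PySem.List.pyRange 2 (n + 1) 1).foldl (stepA (patA n heights)) [1]).sum pvMOD := rfl

lemma user_logic_alt_eq (n : Int) (heights : List Int) :
    user_logic_alt n heights =
      PySem.Int.mod ((PySem.List.pyRange 2 (n + 1) 1).foldl (stepB heights) [1]).sum pvMOD := rfl

def prefList (dp : List Int) : List Int :=
  (List.range dp.length).map (fun k => (dp.take (k + 1)).sum % pvMOD)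

lemma prefFold_eq (dp : List Int) (hinv : ∀ x ∈ dp, 0 ≤ x ∧ x < pvMOD) :
    ∀ (acc : List Int) (r : Int), 0 ≤ r → r < pvMOD →
      dp.foldl prefStep (acc, r) =
        (acc ++ (List.range dp.length).map (fun k => (r + (dp.take (k + 1)).sum) % pvMOD),
         (r + dp.sum) % pvMOD) := by
  induction dp with
  | nil =>
    intro acc r h0 h1
    simp [Int.emod_eq_of_lt h0 h1]
  | cons x rest ih =>
    intro acc r h0 h1
    have hx := hinv x (List.mem_cons_self ..)
    have hrun : (if r + x ≥ pvMOD then r + x - pvMOD else r + x) = (r + x) % pvMOD := by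
      simp only [pvMOD] at hx h0 h1 ⊢; split_ifs with h <;> omega
    have hstep : prefStep (acc, r) x = (acc ++ [(r + x) % pvMOD], (r + x) % pvMOD) := by
      simp [prefStep, hrun]
    have h0' : 0 ≤ (r + x) % pvMOD := by simp only [pvMOD]; omega
    have h1' : (r + x) % pvMOD < pvMOD := by simp only [pvMOD] at *; omega
    have ih' := ih (fun y hy => hinv y (List.mem_cons_of_mem _ hy)) (acc ++ [(r + x) % pvMOD]) _ h0' h1'
    rw [List.foldl_cons, hstep, ih']
    simp only [List.length_cons, List.range_succ_eq_map, List.map_cons, List.map_map,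
      Prod.mk.injEq]
    refine ⟨?_, ?_⟩
    · simp only [List.append_assoc, List.singleton_append]
      congr 1
      congr 1
      · simp
      · apply List.map_congr_left
        intro k _
        simp only [Function.comp_apply, Nat.succ_eq_add_one, List.take_succ_cons, List.sum_cons]
        rw [Int.emod_add_emod]
        congr 1
        ring
    · simp only [List.sum_cons]
      rw [Int.emod_add_emod]
      congr 1
      ring

lemma pref_eq (dp : List Int) (hinv : ∀ x ∈ dp, 0 ≤ x ∧ x < pvMOD) :
    (dp.foldl prefStep ([], 0)).1 = prefList dp := by
  rw [prefFold_eq dp hinv [] 0 le_rfl (by simp only [pvMOD]; omega)]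
  simp [prefList]

lemma prefList_getD (dp : List Int) (j : Int) (h1 : 1 ≤ j) (h2 : j ≤ dp.length) :
    PySem.List.pyGetD (prefList dp) (j - 1) 0 = (dp.take j.toNat).sum % pvMOD := by
  have hlen : (prefList dp).length = dp.length := by simp [prefList]
  have hg := PySem.List.pyGetD_eq_getElem (prefList dp) (i := j - 1) (d := 0) (by omega)
    (by rw [hlen]; omega)
  rw [hg]
  simp only [prefList, List.getElem_map, List.getElem_range]
  have hj : (j - 1).toNat + 1 = j.toNat := by omega
  rw [hj]

lemma prefList_last (dp : List Int) (h : dp ≠ []) :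
    PySem.List.pyGetD (prefList dp) (-1) 0 = dp.sum % pvMOD := by
  have hlen : (prefList dp).length = dp.length := by simp [prefList]
  have hpos : 0 < dp.length := List.length_pos_of_ne_nil h
  have hg := PySem.List.pyGetD_neg_ofNat (prefList dp) 1 0 (by omega)
    (by rw [hlen]; omega)
  rw [hg]
  simp only [prefList, List.getElem_map, List.getElem_range]
  simp only [List.length_map, List.length_range]
  rw [Nat.sub_add_cancel hpos, List.take_length]

lemma patA_eq_map (n : Int) (heights : List Int) :
    patA n heights = (PySem.List.pyRange 0 (n - 1) 1).map (fun i =>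
      if PySem.List.pyGetD heights i 0 > PySem.List.pyGetD heights (i + 1) 0 then '<'
      else if PySem.List.pyGetD heights i 0 < PySem.List.pyGetD heights (i + 1) 0 then '>'
      else '?') := by
  unfold patA
  rw [PySem.List.foldl_append_singleton_eq_map]
  simp

lemma patA_getD (n : Int) (heights : List Int) (i : Int) (h0 : 0 ≤ i) (h1 : i < n - 1) :
    PySem.List.pyGetD (patA n heights) i '?' =
      (if PySem.List.pyGetD heights i 0 > PySem.List.pyGetD heights (i + 1) 0 then '<'
       else if PySem.List.pyGetD heights i 0 < PySem.List.pyGetD heights (i + 1) 0 then '>'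
       else '?') := by
  rw [patA_eq_map]
  exact PySem.List.pyGetD_map_pyRange_of_nonneg _ (n - 1) i '?' h0 h1

lemma step_eq (n : Int) (heights : List Int) (i : Int) (dp : List Int)
    (h2 : 2 ≤ i) (hin : i ≤ n)
    (hd : dp.length = (i - 1).toNat) (hinv : ∀ x ∈ dp, 0 ≤ x ∧ x < pvMOD) :
    stepA (patA n heights) dp i = stepB heights dp i := by
  have hMpos : (0 : Int) < pvMOD := by simp only [pvMOD]; omega
  have hpat := patA_getD n heights (i - 2) (by omega) (by omega)
  have hidx : i - 2 + 1 = i - 1 := by ring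
  rw [hidx] at hpat
  have hdp_ne : dp ≠ [] := by
    intro hnil; rw [hnil] at hd; simp at hd; omega
  have hdlen : (dp.length : Int) = i - 1 := by omega
  rcases lt_trichotomy (PySem.List.pyGetD heights (i - 2) 0) (PySem.List.pyGetD heights (i - 1) 0) with h | h | h
  · -- a < b : sign '>'
    have hsign : PySem.List.pyGetD (patA n heights) (i - 2) '?' = '>' := by
      rw [hpat, if_neg (by omega), if_pos h]
    simp only [stepA, stepB, hsign, if_neg (by omega : ¬ PySem.List.pyGetD heights (i - 2) 0 = PySem.List.pyGetD heights (i - 1) 0),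
      if_neg (by omega : ¬ PySem.List.pyGetD heights (i - 2) 0 > PySem.List.pyGetD heights (i - 1) 0),
      if_neg (by decide : ¬ ('>' : Char) = '?'), if_neg (by decide : ¬ ('>' : Char) = '<')]
    rw [PySem.List.foldl_append_singleton_eq_map (fun j =>
      if j = 0 then PySem.List.pyGetD (dp.foldl prefStep ([], 0)).1 (-1) 0
      else PySem.Int.mod (PySem.List.pyGetD (dp.foldl prefStep ([], 0)).1 (-1) 0 -
        PySem.List.pyGetD (dp.foldl prefStep ([], 0)).1 (j - 1) 0) pvMOD)]
    rw [List.nil_append, pref_eq dp hinv]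
    apply List.map_congr_left
    intro j hj
    rw [PySem.List.mem_pyRange_one] at hj
    rw [PySem.List.slice_from dp hj.1]
    by_cases hj0 : j = 0
    · rw [if_pos hj0, prefList_last dp hdp_ne, hj0]
      simp [PySem.Int.mod_eq_emod_of_pos hMpos]
    · rw [if_neg hj0, prefList_last dp hdp_ne,
        prefList_getD dp j (by omega) (by omega),
        PySem.Int.mod_eq_emod_of_pos hMpos, PySem.Int.mod_eq_emod_of_pos hMpos]
      rw [Int.sub_emod (dp.sum) ((dp.take j.toNat).sum) pvMOD |>.symm]
      rw [← List.sum_take_add_sum_drop dp j.toNat]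
      congr 1
      ring
  · -- a = b : sign '?'
    have hsign : PySem.List.pyGetD (patA n heights) (i - 2) '?' = '?' := by
      rw [hpat, if_neg (by omega), if_neg (by omega)]
    simp [stepA, stepB, hsign, h]
  · -- a > b : sign '<'
    have hsign : PySem.List.pyGetD (patA n heights) (i - 2) '?' = '<' := by
      rw [hpat, if_pos h]
    simp only [stepA, stepB, hsign, if_neg (by omega : ¬ PySem.List.pyGetD heights (i - 2) 0 = PySem.List.pyGetD heights (i - 1) 0),
      if_pos (h : PySem.List.pyGetD heights (i - 2) 0 > PySem.List.pyGetD heights (i - 1) 0),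
      if_neg (by decide : ¬ ('<' : Char) = '?'), if_true]
    rw [PySem.List.foldl_append_singleton_eq_map (fun j =>
      PySem.List.pyGetD (dp.foldl prefStep ([], 0)).1 (j - 1) 0)]
    rw [pref_eq dp hinv]
    rw [PySem.List.pyRange_one_append 0 1 i (by omega) (by omega), List.map_append]
    have h01 : PySem.List.pyRange 0 1 = [(0 : Int)] := by decide
    rw [h01]
    simp only [List.map_cons, List.map_nil, List.singleton_append]
    congr 1
    refine List.map_congr_left ?_
    intro j hj
    rw [PySem.List.mem_pyRange_one] at hj
    rw [PySem.List.slice_to dp (by omega : (0:Int) ≤ j), PySem.Int.mod_eq_emod_of_pos hMpos,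
      prefList_getD dp j (by omega) (by omega)]

lemma stepB_len (heights : List Int) (dp : List Int) (i : Int) :
    (stepB heights dp i).length = i.toNat := by
  simp only [stepB]
  split_ifs <;> simp [PySem.List.length_pyRange_one]

lemma stepB_inv (heights : List Int) (dp : List Int) (i : Int) :
    ∀ x ∈ stepB heights dp i, 0 ≤ x ∧ x < pvMOD := by
  have hMpos : (0 : Int) < pvMOD := by simp only [pvMOD]; omega
  intro x hx
  simp only [stepB] at hx
  split_ifs at hx
  · rw [List.eq_of_mem_replicate hx]
    exact ⟨PySem.Int.mod_nonneg _ hMpos, PySem.Int.mod_lt _ hMpos⟩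
  · obtain ⟨j, _, rfl⟩ := List.mem_map.1 hx
    exact ⟨PySem.Int.mod_nonneg _ hMpos, PySem.Int.mod_lt _ hMpos⟩
  · obtain ⟨j, _, rfl⟩ := List.mem_map.1 hx
    exact ⟨PySem.Int.mod_nonneg _ hMpos, PySem.Int.mod_lt _ hMpos⟩

lemma loop_eq (n : Int) (heights : List Int) :
    ∀ (m : Nat) (k : Int) (dp : List Int), (n + 1 - k).toNat = m → 2 ≤ k →
      dp.length = (k - 1).toNat → (∀ x ∈ dp, 0 ≤ x ∧ x < pvMOD) →
      (PySem.List.pyRange k (n + 1) 1).foldl (stepA (patA n heights)) dp =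
        (PySem.List.pyRange k (n + 1) 1).foldl (stepB heights) dp := by
  intro m
  induction m with
  | zero =>
    intro k dp hm hk hlen hinv
    rw [PySem.List.pyRange_one_eq_nil (by omega)]
    rfl
  | succ m ih =>
    intro k dp hm hk hlen hinv
    rw [PySem.List.pyRange_one_cons (by omega : k < n + 1)]
    rw [List.foldl_cons, List.foldl_cons]
    rw [step_eq n heights k dp hk (by omega) hlen hinv]
    exact ih (k + 1) (stepB heights dp k) (by omega) (by omega)
      (by rw [stepB_len]; omega) (stepB_inv heights dp k)


-- ===== VERDICT (by name: the statement is the Claim_ definition above) =====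
theorem user_logic_spec : Claim_equal_user_logic := by
  intro n heights _hdom _hpre
  unfold Spec_user_logic
  rw [user_logic_eq, user_logic_alt_eq]
  congr 1
  exact congrArg List.sum
    (loop_eq n heights ((n + 1 - 2).toNat) 2 [1] rfl (by omega) (by simp)
      (by intro x hx; simp at hx; subst hx; simp only [pvMOD]; omega))
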